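-- pv_equiv track=rewrite | github.com/dinoplays/Thesis_Project | Python/Bit_Manipulation/disparity.py | _pow_q12_int
-- ===== SOURCE A (Python) =====
-- Q_FRAC = 12
--
-- Q_ONE  = 1 << Q_FRAC  # 4096
--
-- def _mul_q12(a_q12: int, b_q12: int) -> int:
--     # (a*b) in Q12.12 with rounding: (a*b + 2^11)>>12
--     prod = a_q12 * b_q12  # Q24.24
--     if prod >= 0:
--         return (prod + (1 << (Q_FRAC - 1))) >> Q_FRAC
--     return -(((-prod) + (1 << (Q_FRAC - 1))) >> Q_FRAC)
--
-- def _pow_q12_int(base_q12: int, exp: int) -> int: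
--     # integer exponent in Q12.12, rescaling after each multiply.
--     # exp must be >=0.
--     if exp <= 0:
--         return Q_ONE
--     if exp == 1:
--         return base_q12
--     # fast pow
--     result = Q_ONE
--     b = base_q12
--     e = exp
--     while e > 0:
--         if e & 1:
--             result = _mul_q12(result, b)
--         e >>= 1
--         if e:
--             b = _mul_q12(b, b)
--     return result
-- ===== SOURCE B (Python) =====
-- Q_FRAC = 12
--
-- Q_ONE = 1 << Q_FRAC  # 4096
--
-- def _mul_q12(a_q12: int, b_q12: int) -> int:
--     # (a*b) in Q12.12 with rounding: (a*b + 2^11)>>12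
--     prod = a_q12 * b_q12
--     if prod >= 0:
--         return (prod + (1 << (Q_FRAC - 1))) >> Q_FRAC
--     return -(((-prod) + (1 << (Q_FRAC - 1))) >> Q_FRAC)
--
-- def _sqr_iter(b_q12: int, k: int) -> int:
--     # b^(2^k) in Q12.12 by k repeated squarings
--     for _ in range(k):
--         b_q12 = _mul_q12(b_q12, b_q12)
--     return b_q12
--
-- def _pow_q12_int(base_q12: int, exp: int) -> int:
--     # MSB-peeling recursion: multiply the result for the lower bits of exp
--     # by base^(2^L) (recomputed from base), L = index of exp's top set bit.
--     if exp <= 0: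
--         return Q_ONE
--     L = exp.bit_length() - 1
--     if L == 0:
--         return base_q12
--     return _mul_q12(_pow_q12_int(base_q12, exp - (1 << L)), _sqr_iter(base_q12, L))
-- ===== Notes on version B (the rewrite author's own statement) =====
-- stated objective: alternative
-- what changed: A's single stateful LSB-first square-and-multiply loop (shared running square, accumulator) is replaced by a non-tail recursion that peels exp's top set bit, recurses on the remaining exponent, and recomputes each needed power-of-two square from the base by an independent repeated-squaring helper; equality uses that _mul_q12(Q_ONE, x) = x exactly, so the rounded multiplication chain is identical.
import Mathlib
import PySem

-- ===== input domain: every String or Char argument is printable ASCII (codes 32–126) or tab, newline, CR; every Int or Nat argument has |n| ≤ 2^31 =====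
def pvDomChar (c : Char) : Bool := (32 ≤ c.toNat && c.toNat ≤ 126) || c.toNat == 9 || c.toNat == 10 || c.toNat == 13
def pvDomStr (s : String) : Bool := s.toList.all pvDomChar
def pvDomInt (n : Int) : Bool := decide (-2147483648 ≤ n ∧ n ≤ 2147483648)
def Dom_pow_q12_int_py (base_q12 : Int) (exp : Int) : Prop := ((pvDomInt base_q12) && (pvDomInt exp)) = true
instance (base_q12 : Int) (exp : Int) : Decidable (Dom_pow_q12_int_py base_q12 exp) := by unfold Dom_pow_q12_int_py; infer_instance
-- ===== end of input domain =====

-- B replaces A's stateful LSB-first square-and-multiply loop with a non-tail recursion that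
-- peels exp's top set bit and recomputes each square chain from the base (objective: alternative).

-- helper shared by both ports (`_mul_q12` appears verbatim in both Python files):
-- prod ≥ 0 branches shift a nonnegative int right by 12, which is exactly `/ 4096` here.
def mul_q12 (a_q12 b_q12 : Int) : Int :=
  if 0 ≤ a_q12 * b_q12 then (a_q12 * b_q12 + 2048) / 4096
  else -(((-(a_q12 * b_q12)) + 2048) / 4096)

-- ===== PORT A =====
-- the `while e > 0` loop; e is a nonnegative Python int, modelled as Nat
def powLoopA (result b : Int) (e : Nat) : Int :=
  if _h : e = 0 then result
  else
    let result' := if e &&& 1 = 1 then mul_q12 result b else result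
    let e' := e >>> 1
    let b' := if e' ≠ 0 then mul_q12 b b else b
    powLoopA result' b' e'
termination_by e
decreasing_by simp only [Nat.shiftRight_one]; omega

def pow_q12_int_py (base_q12 : Int) (exp : Int) : Int :=
  if exp ≤ 0 then 4096
  else if exp = 1 then base_q12
  else powLoopA 4096 base_q12 exp.toNat

-- ===== PORT B =====
-- `_sqr_iter`: k repeated squarings of b
def sqrIter (b_q12 : Int) : Nat → Int
  | 0 => b_q12
  | Nat.succ k => sqrIter (mul_q12 b_q12 b_q12) k

-- `exp.bit_length() - 1` for exp ≥ 1 is exactly `Nat.log2 exp.toNat`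
def pow_q12_int_py_alt (base_q12 : Int) (exp : Int) : Int :=
  if _h : exp ≤ 0 then 4096
  else if _hL : Nat.log2 exp.toNat = 0 then base_q12
  else mul_q12 (pow_q12_int_py_alt base_q12 (exp - (2 : Int) ^ Nat.log2 exp.toNat))
               (sqrIter base_q12 (Nat.log2 exp.toNat))
termination_by exp.toNat
decreasing_by
  have h1 : exp.toNat ≠ 0 := by omega
  have h2 : 2 ^ Nat.log2 exp.toNat ≤ exp.toNat := Nat.log2_self_le h1
  have h3 : 0 < 2 ^ Nat.log2 exp.toNat := Nat.two_pow_pos _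
  have h4 : ((2 : Int) ^ Nat.log2 exp.toNat) = ((2 ^ Nat.log2 exp.toNat : Nat) : Int) := by
    push_cast; ring
  rw [h4]
  omega

-- ===== PRECONDITION & SPEC =====
def Spec_pow_q12_int_py (base_q12 : Int) (exp : Int) (out : Int) : Prop := out = pow_q12_int_py_alt base_q12 exp
instance (base_q12 : Int) (exp : Int) (out : Int) : Decidable (Spec_pow_q12_int_py base_q12 exp out) := by unfold Spec_pow_q12_int_py; infer_instance

-- ===== CLAIM (what is proved, stated in full; the proofs are below) =====
def Claim_equal_pow_q12_int_py : Prop := ∀ (base_q12 : Int) (exp : Int), Dom_pow_q12_int_py base_q12 exp → Spec_pow_q12_int_py base_q12 exp (pow_q12_int_py base_q12 exp)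

-- ===== LEMMAS AND PROOFS =====

theorem mul_q12_one_left (x : Int) : mul_q12 4096 x = x := by
  unfold mul_q12
  split <;> omega

theorem powLoopA_zero (r b : Int) : powLoopA r b 0 = r := by
  rw [powLoopA]; simp

-- one unrolling of A's loop; the `if e' ≠ 0` guard on squaring b is immaterial
-- because b is unused once e' = 0
theorem powLoopA_step (r b : Int) (m : Nat) (hm : 0 < m) :
    powLoopA r b m
      = powLoopA (if m &&& 1 = 1 then mul_q12 r b else r) (mul_q12 b b) (m >>> 1) := by
  rw [powLoopA]
  simp only [Nat.pos_iff_ne_zero.mp hm, dite_false]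
  by_cases h : m >>> 1 = 0
  · simp [h, powLoopA_zero]
  · simp [h]

-- peel the top set bit: A's left-associated chain ends with a multiply by b^(2^(log2 m))
theorem powLoopA_peel :
    ∀ (e : Nat), 0 < e → ∀ (r b : Int),
      powLoopA r b e
        = mul_q12 (powLoopA r b (e - 2 ^ Nat.log2 e)) (sqrIter b (Nat.log2 e)) := by
  intro e
  induction e using Nat.strong_induction_on with
  | _ e ih =>
    intro he r b
    by_cases h1 : e = 1
    · subst h1
      rw [powLoopA_step _ _ _ one_pos]
      rw [show Nat.log2 1 = 0 from rfl, show (1:Nat) >>> 1 = 0 from rfl]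
      norm_num [powLoopA_zero, sqrIter]
    · have h2 : 2 ≤ e := by omega
      have hlog : Nat.log2 e = Nat.log2 (e / 2) + 1 := by
        rw [Nat.log2_def]; simp [h2]
      have he' : 0 < e / 2 := by omega
      have hle : 2 ^ Nat.log2 (e / 2) ≤ e / 2 := Nat.log2_self_le (by omega)
      have hsh : e >>> 1 = e / 2 := Nat.shiftRight_one e
      rw [powLoopA_step _ _ _ he, hsh, ih (e / 2) (by omega) he']
      have hsq : sqrIter (mul_q12 b b) (Nat.log2 (e / 2)) = sqrIter b (Nat.log2 e) := by
        rw [hlog]; rfl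
      rw [hsq, hlog]
      congr 1
      -- remaining: the chains over the lower bits coincide
      have hpow : 2 ^ (Nat.log2 (e / 2) + 1) = 2 * 2 ^ Nat.log2 (e / 2) := by ring
      have hge : 2 ^ (Nat.log2 (e / 2) + 1) ≤ e := hlog ▸ Nat.log2_self_le (by omega)
      by_cases hm : e - 2 ^ (Nat.log2 (e / 2) + 1) = 0
      · have hpar : ¬ e &&& 1 = 1 := by
          rw [Nat.and_one_is_mod]; omega
        have hz : e / 2 - 2 ^ Nat.log2 (e / 2) = 0 := by omega
        simp only [Nat.and_one_is_mod] at hpar ⊢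
        simp [hpar, hm, hz, powLoopA_zero]
      · have hb : (e - 2 ^ (Nat.log2 (e / 2) + 1)) &&& 1 = e &&& 1 := by
          rw [Nat.and_one_is_mod, Nat.and_one_is_mod]; omega
        have hs : (e - 2 ^ (Nat.log2 (e / 2) + 1)) >>> 1 = e / 2 - 2 ^ Nat.log2 (e / 2) := by
          rw [Nat.shiftRight_one]; omega
        rw [powLoopA_step r b (e - 2 ^ (Nat.log2 (e / 2) + 1)) (by omega), hb, hs]

-- B's recursion computes exactly A's loop (on positive exponents)
theorem alt_eq_loop :
    ∀ (n : Nat), 0 < n → ∀ (base : Int),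
      pow_q12_int_py_alt base (n : Int) = powLoopA 4096 base n := by
  intro n
  induction n using Nat.strong_induction_on with
  | _ n ih =>
    intro hn base
    have hneg : ¬ ((n : Int) ≤ 0) := by exact_mod_cast by omega
    have htn : ((n : Int)).toNat = n := Int.toNat_natCast n
    rw [pow_q12_int_py_alt]
    simp only [hneg, dite_false, htn]
    by_cases hL : Nat.log2 n = 0
    · have h1 : n = 1 := by
        by_contra h
        have h2 : 2 ≤ n := by omega
        rw [Nat.log2_def] at hL; simp [h2] at hL
      subst h1
      rw [powLoopA_step _ _ _ one_pos]
      rw [show (1:Nat) >>> 1 = 0 from rfl]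
      norm_num [powLoopA_zero, mul_q12_one_left, hL]
    · simp only [hL, dite_false]
      have hle : 2 ^ Nat.log2 n ≤ n := Nat.log2_self_le (by omega)
      have hc : (n : Int) - (2 : Int) ^ Nat.log2 n = ((n - 2 ^ Nat.log2 n : Nat) : Int) := by
        push_cast [hle]; ring
      rw [hc, powLoopA_peel n hn]
      by_cases hm : n - 2 ^ Nat.log2 n = 0
      · rw [hm]
        rw [pow_q12_int_py_alt]
        simp [powLoopA_zero]
      · rw [ih (n - 2 ^ Nat.log2 n) (by have : 0 < 2 ^ Nat.log2 n := Nat.two_pow_pos _; omega) (by omega)]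

-- ===== VERDICT (by name: the statement is the Claim_ definition above) =====
theorem pow_q12_int_py_spec : Claim_equal_pow_q12_int_py := by
  intro base_q12 exp _
  unfold Spec_pow_q12_int_py pow_q12_int_py
  by_cases h0 : exp ≤ 0
  · rw [pow_q12_int_py_alt]
    simp [h0]
  · have hpos : 0 < exp.toNat := by omega
    have hcast : ((exp.toNat : Nat) : Int) = exp := Int.toNat_of_nonneg (by omega)
    have halt := alt_eq_loop exp.toNat hpos base_q12
    rw [hcast] at halt
    by_cases h1 : exp = 1
    · subst h1
      simp only [h0, if_false]
      rw [halt]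
      show base_q12 = powLoopA 4096 base_q12 ((1:Int)).toNat
      rw [show ((1:Int)).toNat = 1 from rfl, powLoopA_step _ _ _ one_pos]
      rw [show (1:Nat) >>> 1 = 0 from rfl]
      norm_num [powLoopA_zero, mul_q12_one_left]
    · simp only [h0, h1, if_false]
      rw [halt]
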